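-- pv_equiv track=rewrite | github.com/arrowlimo/arrow-limo | scripts/verify_routing_from_excel_vs_charter_routes.py | header_map
-- ===== SOURCE A (Python) =====
-- def header_map(headers):
--     mapping = {}
--     for idx, h in enumerate(headers):
--         key = str(h).strip().lower()
--         if key in ("reserve", "reserve_no", "reserve number", "reserve_number"):
--             mapping[idx] = "reserve_no"
--         elif key in ("line_1", "pickup_line1", "pickup address", "pickup_location_1"):
--             mapping[idx] = "line_1"
--         elif key in ("line_2", "pickup_line2", "pickup address 2", "pickup_location_2"):
--             mapping[idx] = "line_2"
--         elif key in ("from_to", "dropoff", "dropoff address", "dropoff_location"):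
--             mapping[idx] = "from_to"
--         elif key in ("pu_time", "pickup_time"):
--             mapping[idx] = "pu_time"
--         elif key in ("do_time", "dropoff_time"):
--             mapping[idx] = "do_time"
--         elif key in ("trip_notes", "notes", "route_notes"):
--             mapping[idx] = "trip_notes"
--         # ignore other headers
--     return mapping
-- ===== SOURCE B (Python) =====
-- GROUPS = [
--     ("reserve_no", ("reserve", "reserve_no", "reserve number", "reserve_number")),
--     ("line_1", ("line_1", "pickup_line1", "pickup address", "pickup_location_1")),
--     ("line_2", ("line_2", "pickup_line2", "pickup address 2", "pickup_location_2")),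
--     ("from_to", ("from_to", "dropoff", "dropoff address", "dropoff_location")),
--     ("pu_time", ("pu_time", "pickup_time")),
--     ("do_time", ("do_time", "dropoff_time")),
--     ("trip_notes", ("trip_notes", "notes", "route_notes")),
-- ]
--
--
-- def header_map(headers):
--     # Stage 1: normalize every header once.
--     keys = [str(h).strip().lower() for h in headers]
--     # Stage 2: group-major sweep — collect (index, canonical) pairs per alias group.
--     pairs = []
--     for canon, aliases in GROUPS:
--         pairs += [(i, canon) for i, k in enumerate(keys) if k in aliases]
--     # Stage 3: restore header order (indices are distinct) and build the dict.
--     pairs.sort(key=lambda p: p[0])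
--     return dict(pairs)
-- ===== Notes on version B (the rewrite author's own statement) =====
-- stated objective: alternative
-- what changed: Replaced A's single header-major pass with an if/elif chain by three staged passes: normalize all headers, sweep group-major collecting (index, canonical) pairs per alias group, then sort by index and build the dict; correct because the alias groups are disjoint and indices are distinct.
import Mathlib
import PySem

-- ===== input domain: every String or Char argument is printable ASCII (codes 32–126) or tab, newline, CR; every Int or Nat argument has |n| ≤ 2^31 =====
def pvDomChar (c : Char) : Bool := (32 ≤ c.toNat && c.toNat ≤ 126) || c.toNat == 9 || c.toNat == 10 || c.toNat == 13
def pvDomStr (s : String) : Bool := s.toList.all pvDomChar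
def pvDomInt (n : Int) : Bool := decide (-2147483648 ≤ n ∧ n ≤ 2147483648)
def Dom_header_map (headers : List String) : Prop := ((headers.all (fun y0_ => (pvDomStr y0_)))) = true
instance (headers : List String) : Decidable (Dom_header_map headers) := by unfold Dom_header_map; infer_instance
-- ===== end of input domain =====

-- B replaces A's header-major if/elif pass by staged passes (normalize, group-major collection, sort by index, build dict); same values everywhere.

-- ===== PORT A =====
def header_map (headers : List String) : List (Int × String) :=
  ((PySem.List.enumerate headers).foldl
    (fun (mapping : PySem.Dict Int String) p =>
      let key := PySem.Str.lower (PySem.Str.strip p.2)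
      if key ∈ ["reserve", "reserve_no", "reserve number", "reserve_number"] then
        mapping.insert p.1 "reserve_no"
      else if key ∈ ["line_1", "pickup_line1", "pickup address", "pickup_location_1"] then
        mapping.insert p.1 "line_1"
      else if key ∈ ["line_2", "pickup_line2", "pickup address 2", "pickup_location_2"] then
        mapping.insert p.1 "line_2"
      else if key ∈ ["from_to", "dropoff", "dropoff address", "dropoff_location"] then
        mapping.insert p.1 "from_to"
      else if key ∈ ["pu_time", "pickup_time"] then
        mapping.insert p.1 "pu_time"
      else if key ∈ ["do_time", "dropoff_time"] then
        mapping.insert p.1 "do_time"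
      else if key ∈ ["trip_notes", "notes", "route_notes"] then
        mapping.insert p.1 "trip_notes"
      else
        mapping)
    PySem.Dict.empty).items

-- ===== PORT B =====
def hmGroups : List (String × List String) :=
  [("reserve_no", ["reserve", "reserve_no", "reserve number", "reserve_number"]),
   ("line_1", ["line_1", "pickup_line1", "pickup address", "pickup_location_1"]),
   ("line_2", ["line_2", "pickup_line2", "pickup address 2", "pickup_location_2"]),
   ("from_to", ["from_to", "dropoff", "dropoff address", "dropoff_location"]),
   ("pu_time", ["pu_time", "pickup_time"]),
   ("do_time", ["do_time", "dropoff_time"]),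
   ("trip_notes", ["trip_notes", "notes", "route_notes"])]

def header_map_alt (headers : List String) : List (Int × String) :=
  -- Stage 1: normalize every header once.
  let keys := headers.map (fun h => PySem.Str.lower (PySem.Str.strip h))
  -- Stage 2: group-major sweep collecting (index, canonical) pairs.
  let pairs := hmGroups.foldl
    (fun (acc : List (Int × String)) g =>
      acc ++ ((PySem.List.enumerate keys).filter (fun p => decide (p.2 ∈ g.2))).map
        (fun p => (p.1, g.1)))
    []
  -- Stage 3: sort by index and build the dict.
  (PySem.Dict.ofList (PySem.List.sorted pairs (fun p => p.1))).items

-- ===== PRECONDITION & SPEC =====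
def Spec_header_map (headers : List String) (out : List (Int × String)) : Prop := out = header_map_alt headers
instance (headers : List String) (out : List (Int × String)) : Decidable (Spec_header_map headers out) := by unfold Spec_header_map; infer_instance

-- ===== CLAIM (what is proved, stated in full; the proofs are below) =====
def Claim_equal_header_map : Prop := ∀ (headers : List String), Dom_header_map headers → Spec_header_map headers (header_map headers)

-- ===== LEMMAS AND PROOFS =====

-- canonical name of a normalized key (proof-only helper)
def hmCanon (key : String) : Option String :=
  if key ∈ ["reserve", "reserve_no", "reserve number", "reserve_number"] then some "reserve_no"
  else if key ∈ ["line_1", "pickup_line1", "pickup address", "pickup_location_1"] then some "line_1"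
  else if key ∈ ["line_2", "pickup_line2", "pickup address 2", "pickup_location_2"] then some "line_2"
  else if key ∈ ["from_to", "dropoff", "dropoff address", "dropoff_location"] then some "from_to"
  else if key ∈ ["pu_time", "pickup_time"] then some "pu_time"
  else if key ∈ ["do_time", "dropoff_time"] then some "do_time"
  else if key ∈ ["trip_notes", "notes", "route_notes"] then some "trip_notes"
  else none

def hmNorm (h : String) : String := PySem.Str.lower (PySem.Str.strip h)

def hmF (p : Int × String) : Option (Int × String) := (hmCanon (hmNorm p.2)).map (fun c => (p.1, c))

-- A's step function written through hmCanon
theorem hmStepA_eq :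
    (fun (mapping : PySem.Dict Int String) (p : Int × String) =>
      let key := PySem.Str.lower (PySem.Str.strip p.2)
      if key ∈ ["reserve", "reserve_no", "reserve number", "reserve_number"] then
        mapping.insert p.1 "reserve_no"
      else if key ∈ ["line_1", "pickup_line1", "pickup address", "pickup_location_1"] then
        mapping.insert p.1 "line_1"
      else if key ∈ ["line_2", "pickup_line2", "pickup address 2", "pickup_location_2"] then
        mapping.insert p.1 "line_2"
      else if key ∈ ["from_to", "dropoff", "dropoff address", "dropoff_location"] then
        mapping.insert p.1 "from_to"
      else if key ∈ ["pu_time", "pickup_time"] then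
        mapping.insert p.1 "pu_time"
      else if key ∈ ["do_time", "dropoff_time"] then
        mapping.insert p.1 "do_time"
      else if key ∈ ["trip_notes", "notes", "route_notes"] then
        mapping.insert p.1 "trip_notes"
      else
        mapping) =
    (fun (mapping : PySem.Dict Int String) (p : Int × String) =>
      match hmCanon (hmNorm p.2) with
      | some c => mapping.insert p.1 c
      | none => mapping) := by
  funext mapping p
  simp only [hmCanon, hmNorm]
  split_ifs <;> rfl

-- A's loop over pairwise-distinct fresh indices produces exactly the filterMap
theorem hmA_fold (l : List (Int × String)) (d : PySem.Dict Int String)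
    (hd : ∀ p ∈ l, d.contains p.1 = false)
    (hp : l.Pairwise (fun p q => p.1 ≠ q.1)) :
    (l.foldl
      (fun (mapping : PySem.Dict Int String) p =>
        match hmCanon (hmNorm p.2) with
        | some c => mapping.insert p.1 c
        | none => mapping) d).items = d.items ++ l.filterMap hmF := by
  induction l generalizing d with
  | nil => simp
  | cons p l ih =>
    have hdp : d.contains p.1 = false := hd p (List.mem_cons_self ..)
    have hne : ∀ q ∈ l, q.1 ≠ p.1 := fun q hq => (List.rel_of_pairwise_cons hp hq).symm
    cases hc : hmCanon (hmNorm p.2) with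
    | none =>
      have hFp : hmF p = none := by simp [hmF, hc]
      simp only [List.foldl_cons, hc, List.filterMap_cons, hFp]
      exact ih d (fun q hq => hd q (List.mem_cons_of_mem _ hq)) hp.of_cons
    | some c =>
      have hFp : hmF p = some (p.1, c) := by simp [hmF, hc]
      have hd' : ∀ q ∈ l, (d.insert p.1 c).contains q.1 = false := by
        intro q hq
        rw [PySem.Dict.contains_insert]
        simp [hne q hq, hd q (List.mem_cons_of_mem _ hq)]
      simp only [List.foldl_cons, hc, ih (d.insert p.1 c) hd' hp.of_cons,
        List.filterMap_cons, hFp,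
        PySem.Dict.items_insert_of_not_contains d c hdp, List.append_assoc,
        List.singleton_append]

-- enumerate commutes with map (indices unchanged)
theorem hmEnumerate_map {α β : Type} (g : α → β) (xs : List α) (s : Int) :
    PySem.List.enumerate (xs.map g) s =
      (PySem.List.enumerate xs s).map (fun p => (p.1, g p.2)) := by
  induction xs generalizing s with
  | nil => simp [PySem.List.enumerate]
  | cons x xs ih => simp [PySem.List.enumerate_cons, ih]

-- pull the distinguished element of a nested append to the front (up to permutation)
theorem hmPull {α : Type} (x : List α) {l r : List α} {a : α} (h : l.Perm (a :: r)) :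
    (x ++ l).Perm (a :: (x ++ r)) :=
  (h.append_left x).trans List.perm_middle

-- B's group-major collected pairs are a permutation of the index-major filterMap
set_option maxHeartbeats 2000000 in
theorem hmPairs_perm (phi : Int × String → Option (Int × String))
    (hphi : ∀ q : Int × String, phi q = (hmCanon q.2).map (fun c => (q.1, c)))
    (l : List (Int × String)) :
    (hmGroups.foldl
      (fun (acc : List (Int × String)) g =>
        acc ++ (l.filter (fun p => decide (p.2 ∈ g.2))).map (fun p => (p.1, g.1)))
      []).Perm
      (l.filterMap phi) := by
  induction l with
  | nil => simp [hmGroups]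
  | cons p l ih =>
    simp only [hmGroups, List.foldl_cons, List.foldl_nil, List.nil_append,
      List.append_assoc] at ih ⊢
    rw [List.filterMap_cons, hphi p]
    by_cases hall : p.2 ∈ ["reserve", "reserve_no", "reserve number", "reserve_number",
      "line_1", "pickup_line1", "pickup address", "pickup_location_1",
      "line_2", "pickup_line2", "pickup address 2", "pickup_location_2",
      "from_to", "dropoff", "dropoff address", "dropoff_location",
      "pu_time", "pickup_time", "do_time", "dropoff_time",
      "trip_notes", "notes", "route_notes"]
    · simp only [List.mem_cons, List.not_mem_nil, or_false] at hall
      obtain ⟨i, s⟩ := p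
      simp only at hall
      rcases hall with rfl | rfl | rfl | rfl | rfl | rfl | rfl | rfl | rfl | rfl | rfl | rfl |
        rfl | rfl | rfl | rfl | rfl | rfl | rfl | rfl | rfl | rfl | rfl <;>
        · norm_num [List.filter_cons, hmCanon] at ih ⊢
          try simp only [List.cons_append, List.append_assoc] at ih
          try simp only [List.cons_append, List.append_assoc]
          first
          | exact ih
          | refine List.Perm.trans ?_ (ih.cons _) <;>
            first
            | exact List.Perm.refl _
            | exact hmPull _ (List.Perm.refl _)
            | exact hmPull _ (hmPull _ (List.Perm.refl _))
            | exact hmPull _ (hmPull _ (hmPull _ (List.Perm.refl _)))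
            | exact hmPull _ (hmPull _ (hmPull _ (hmPull _ (List.Perm.refl _))))
            | exact hmPull _ (hmPull _ (hmPull _ (hmPull _ (hmPull _ (List.Perm.refl _)))))
            | exact hmPull _ (hmPull _ (hmPull _ (hmPull _ (hmPull _ (hmPull _ (List.Perm.refl _))))))
    · rw [show ("reserve" :: "reserve_no" :: "reserve number" :: "reserve_number" ::
        "line_1" :: "pickup_line1" :: "pickup address" :: "pickup_location_1" ::
        "line_2" :: "pickup_line2" :: "pickup address 2" :: "pickup_location_2" ::
        "from_to" :: "dropoff" :: "dropoff address" :: "dropoff_location" ::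
        "pu_time" :: "pickup_time" :: "do_time" :: "dropoff_time" ::
        "trip_notes" :: "notes" :: "route_notes" :: ([] : List String)) =
        ["reserve", "reserve_no", "reserve number", "reserve_number"] ++
        (["line_1", "pickup_line1", "pickup address", "pickup_location_1"] ++
        (["line_2", "pickup_line2", "pickup address 2", "pickup_location_2"] ++
        (["from_to", "dropoff", "dropoff address", "dropoff_location"] ++
        (["pu_time", "pickup_time"] ++ (["do_time", "dropoff_time"] ++
        ["trip_notes", "notes", "route_notes"]))))) from rfl] at hall
      have h1 : ¬ p.2 ∈ ["reserve", "reserve_no", "reserve number", "reserve_number"] :=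
        fun h => hall (List.mem_append_left _ h)
      have h2 : ¬ p.2 ∈ ["line_1", "pickup_line1", "pickup address", "pickup_location_1"] :=
        fun h => hall (List.mem_append_right _ (List.mem_append_left _ h))
      have h3 : ¬ p.2 ∈ ["line_2", "pickup_line2", "pickup address 2", "pickup_location_2"] :=
        fun h => hall (List.mem_append_right _ (List.mem_append_right _ (List.mem_append_left _ h)))
      have h4 : ¬ p.2 ∈ ["from_to", "dropoff", "dropoff address", "dropoff_location"] :=
        fun h => hall (List.mem_append_right _ (List.mem_append_right _ (List.mem_append_right _
          (List.mem_append_left _ h))))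
      have h5 : ¬ p.2 ∈ ["pu_time", "pickup_time"] :=
        fun h => hall (List.mem_append_right _ (List.mem_append_right _ (List.mem_append_right _
          (List.mem_append_right _ (List.mem_append_left _ h)))))
      have h6 : ¬ p.2 ∈ ["do_time", "dropoff_time"] :=
        fun h => hall (List.mem_append_right _ (List.mem_append_right _ (List.mem_append_right _
          (List.mem_append_right _ (List.mem_append_right _ (List.mem_append_left _ h))))))
      have h7 : ¬ p.2 ∈ ["trip_notes", "notes", "route_notes"] :=
        fun h => hall (List.mem_append_right _ (List.mem_append_right _ (List.mem_append_right _
          (List.mem_append_right _ (List.mem_append_right _ (List.mem_append_right _ h))))))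
      have hc : hmCanon p.2 = none := by
        rw [hmCanon, if_neg h1, if_neg h2, if_neg h3, if_neg h4, if_neg h5, if_neg h6, if_neg h7]
      simp only [List.filter_cons, decide_eq_false h1, decide_eq_false h2, decide_eq_false h3,
        decide_eq_false h4, decide_eq_false h5, decide_eq_false h6, decide_eq_false h7,
        Bool.false_eq_true, if_false, hc, Option.map_none]
      exact ih

-- the index-major filterMap has strictly increasing indices
theorem hmL_pairwise (xs : List (Int × String)) :
    (xs.Pairwise (fun p q : Int × String => p.1 < q.1)) →
    ((xs.filterMap hmF).Pairwise (fun a b : Int × String => a.1 < b.1)) := by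
  intro h
  rw [List.pairwise_filterMap]
  refine h.imp ?_
  rintro ⟨i, u⟩ ⟨j, v⟩ hij b hb b' hb'
  simp only [hmF, Option.map_eq_some_iff] at hb hb'
  obtain ⟨c, -, rfl⟩ := hb
  obtain ⟨c', -, rfl⟩ := hb'
  exact hij

-- ===== VERDICT (by name: the statement is the Claim_ definition above) =====
set_option maxHeartbeats 2000000 in
theorem header_map_spec : Claim_equal_header_map := by
  intro headers _
  show header_map headers = header_map_alt headers
  unfold header_map header_map_alt
  rw [hmStepA_eq]
  have hLpw : ((PySem.List.enumerate headers).filterMap hmF).Pairwise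
      (fun a b : Int × String => a.1 < b.1) :=
    hmL_pairwise _ (PySem.List.pairwise_lt_enumerate headers 0)
  -- A side
  rw [hmA_fold (PySem.List.enumerate headers) PySem.Dict.empty
    (fun p _ => PySem.Dict.contains_empty p.1)
    ((PySem.List.pairwise_lt_enumerate headers 0).imp (fun h => ne_of_lt h))]
  -- B side: the enumerate over normalized keys is the map of the enumerate over headers
  have hperm := hmPairs_perm
    (fun q : Int × String => (hmCanon q.2).map (fun c => (q.1, c))) (fun _ => rfl)
    (PySem.List.enumerate (headers.map (fun h => PySem.Str.lower (PySem.Str.strip h))) 0)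
  have hLalt : (PySem.List.enumerate
      (headers.map (fun h => PySem.Str.lower (PySem.Str.strip h))) 0).filterMap
      (fun q : Int × String => (hmCanon q.2).map (fun c => (q.1, c))) =
      (PySem.List.enumerate headers).filterMap hmF := by
    rw [hmEnumerate_map, List.filterMap_map]
    refine List.filterMap_congr ?_
    intro p _
    simp only [Function.comp_apply, hmF, hmNorm]
  rw [hLalt] at hperm
  have hsorted := PySem.List.sorted_eq_of_perm_of_pairwise_lt _
    ((PySem.List.enumerate headers).filterMap hmF) (fun p : Int × String => p.1)
    hperm.symm hLpw
  simp only [hsorted]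
  -- dict built from strictly index-increasing pairs lists exactly those pairs
  have hnodup : (((PySem.List.enumerate headers).filterMap hmF).map Prod.fst).Nodup :=
    List.pairwise_map.mpr (hLpw.imp fun h => ne_of_lt h)
  have hB := PySem.Dict.items_foldl_insert_fresh
    ((PySem.List.enumerate headers).filterMap hmF) Prod.fst Prod.snd PySem.Dict.empty
    (fun p _ => PySem.Dict.contains_empty p.1) hnodup
  unfold PySem.Dict.ofList PySem.Dict.update
  simpa using hB.symm
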